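-- pv_equiv track=rewrite | github.com/hanufu/Desafio-Zero-SantoDigital | desafio_avancado_3.py | find_all_subsets_advanced
-- ===== SOURCE A (Python) =====
-- from itertools import chain, combinations
-- from typing import List
--
-- def find_all_subsets_advanced(nums: List[int], max_size: int = None, min_size: int = None,
--                               distinct_only: bool = False, sort_subsets: bool = False) -> List[List[int]]:
--
--     if distinct_only:
--         nums = list(set(nums))
--
--     all_subsets = list(chain.from_iterable(combinations(nums, r) for r in range(len(nums) + 1)))
--
--     if min_size is not None:
--         all_subsets = [subset for subset in all_subsets if len(subset) >= min_size]
--     if max_size is not None: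
--         all_subsets = [subset for subset in all_subsets if len(subset) <= max_size]
--
--     if sort_subsets:
--         all_subsets = [sorted(list(subset)) for subset in all_subsets]
--         all_subsets.sort()
--
--     return [list(subset) for subset in all_subsets]
-- ===== SOURCE B (Python) =====
-- def find_all_subsets_advanced(nums, max_size=None, min_size=None,
--                               distinct_only=False, sort_subsets=False):
--     if distinct_only:
--         nums = sorted(set(nums))
--     n = len(nums)
--     lo = 0 if min_size is None else max(0, min_size)
--     hi = n if max_size is None else min(n, max_size)
--     result = []
--     level = [([], nums)]  # (subset, remaining candidates), grown size by size
--     for r in range(hi + 1):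
--         if r >= lo:
--             result.extend(s for s, _ in level)
--         nxt = []
--         for s, rest in level:
--             for k, x in enumerate(rest):
--                 nxt.append((s + [x], rest[k + 1:]))
--         level = nxt
--     if sort_subsets:
--         result = sorted(sorted(s) for s in result)
--     return result
-- ===== Notes on version B (the rewrite author's own statement) =====
-- stated objective: alternative
-- what changed: B grows subsets level by level (size r from size r-1 via (subset, remaining-candidates) pairs) and only iterates r up to min(n, max_size), never generating oversized subsets, instead of materialising combinations of every size 0..n and filtering by length; distinct_only uses the deterministic sorted(set(nums)) instead of hash-ordered list(set(nums)).
-- outside the precondition, e.g. on find_all_subsets_advanced([-1, -2], 1, 1, True, False): A returns [[-1], [-2]], B returns [[-2], [-1]]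
import Mathlib
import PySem

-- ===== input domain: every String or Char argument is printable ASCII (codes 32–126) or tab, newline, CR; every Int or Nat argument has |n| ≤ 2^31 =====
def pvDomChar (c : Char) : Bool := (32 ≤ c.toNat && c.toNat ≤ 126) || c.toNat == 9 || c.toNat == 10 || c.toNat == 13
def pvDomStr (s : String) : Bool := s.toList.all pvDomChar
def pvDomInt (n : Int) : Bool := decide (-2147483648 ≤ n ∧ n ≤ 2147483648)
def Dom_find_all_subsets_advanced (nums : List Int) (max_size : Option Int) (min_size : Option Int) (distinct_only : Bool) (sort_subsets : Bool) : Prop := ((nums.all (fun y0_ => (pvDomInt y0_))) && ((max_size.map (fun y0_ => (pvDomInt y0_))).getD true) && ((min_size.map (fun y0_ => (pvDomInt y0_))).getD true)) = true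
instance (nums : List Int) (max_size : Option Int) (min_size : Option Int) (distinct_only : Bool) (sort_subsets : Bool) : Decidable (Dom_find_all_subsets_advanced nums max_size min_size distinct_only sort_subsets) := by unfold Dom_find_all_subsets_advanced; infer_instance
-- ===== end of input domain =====

-- B generates subsets level by level, only for sizes up to min(len, max_size), instead of materialising
-- all combinations of every size and filtering by length; Pre_ excludes the corner whose output order
-- depends on CPython's set iteration order (distinct_only without sort_subsets).


-- ===== PORT A =====
-- itertools.combinations(pool, r): hand port, exact (index-lexicographic order of the r-tuples)
def pvCombinations (xs : List Int) (r : Nat) : List (List Int) :=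
  match r, xs with
  | 0, _ => [[]]
  | _+1, [] => []
  | r+1, x :: rest => ((pvCombinations rest r).map (fun c => x :: c)) ++ pvCombinations rest (r+1)

-- all_subsets after the two length filters (A's lines 2-5; r of range(len+1) is a Nat)
def pvFilteredA (xs : List Int) (max_size : Option Int) (min_size : Option Int) : List (List Int) :=
  let all0 := (List.range (xs.length + 1)).flatMap (fun r => pvCombinations xs r)
  let all1 := match min_size with
    | none => all0
    | some m => all0.filter (fun s => decide (m ≤ (s.length : Int)))
  match max_size with
    | none => all1
    | some m => all1.filter (fun s => decide ((s.length : Int) ≤ m))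

-- list(set(nums)) is ported as the first-occurrence distinct list (PySem.Set.ofList); CPython's hash
-- iteration order is not modelled — exact only under Pre_ (distinct_only → sort_subsets, where the
-- fully sorted output cannot depend on that order).
def find_all_subsets_advanced (nums : List Int) (max_size : Option Int) (min_size : Option Int) (distinct_only : Bool) (sort_subsets : Bool) : List (List Int) :=
  let nums1 := if distinct_only then PySem.Set.ofList nums else nums
  let all2 := pvFilteredA nums1 max_size min_size
  if sort_subsets then
    PySem.List.sorted (all2.map (fun s => PySem.List.sorted s (fun x => x) false)) (fun x => x) false
  else all2

-- ===== PORT B =====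
-- one growth step: each (subset, remaining candidates) spawns (subset+[x], candidates after x);
-- rest[k+1:] is PySem.List.slice rest (some (k+1)) none, k the enumerate index
def pvStep (level : List (List Int × List Int)) : List (List Int × List Int) :=
  level.flatMap (fun p =>
    (PySem.List.enumerate p.2).map (fun q => (p.1 ++ [q.2], PySem.List.slice p.2 (some (q.1 + 1)) none)))

-- B's main loop: for r in range(hi+1), flush the level into result when r >= lo, then grow it
def pvLoopB (xs : List Int) (lo hi : Int) : List (List Int) :=
  ((PySem.List.pyRange 0 (hi + 1) 1).foldl
    (fun (st : List (List Int) × List (List Int × List Int)) r =>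
      ((if lo ≤ r then st.1 ++ st.2.map (fun p => p.1) else st.1), pvStep st.2))
    ([], [([], xs)])).1

def find_all_subsets_advanced_alt (nums : List Int) (max_size : Option Int) (min_size : Option Int) (distinct_only : Bool) (sort_subsets : Bool) : List (List Int) :=
  -- sorted(set(nums)): order-insensitive consumption of the set (sorted without key), exact
  let nums1 := if distinct_only then PySem.List.sorted (PySem.Set.ofList nums) (fun x => x) false else nums
  let n : Int := nums1.length
  let lo : Int := match min_size with | none => 0 | some m => max 0 m
  let hi : Int := match max_size with | none => n | some m => min n m
  let result := pvLoopB nums1 lo hi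
  if sort_subsets then
    PySem.List.sorted (result.map (fun s => PySem.List.sorted s (fun x => x) false)) (fun x => x) false
  else result

-- ===== PRECONDITION & SPEC =====
-- Pre_ excludes distinct_only = True with sort_subsets = False: there the ORDER of A's returned subsets
-- depends on CPython's set iteration (hash) order, an accident of the implementation; B uses the
-- first-occurrence order instead. With sort_subsets = True the result is order-insensitive and kept.
def Pre_find_all_subsets_advanced (nums : List Int) (max_size : Option Int) (min_size : Option Int) (distinct_only : Bool) (sort_subsets : Bool) : Prop :=
  distinct_only = true → sort_subsets = true
instance (nums : List Int) (max_size : Option Int) (min_size : Option Int) (distinct_only : Bool) (sort_subsets : Bool) : Decidable (Pre_find_all_subsets_advanced nums max_size min_size distinct_only sort_subsets) := by unfold Pre_find_all_subsets_advanced; infer_instance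

def pvWitness_find_all_subsets_advanced : List Int × Option Int × Option Int × Bool × Bool :=
  ([1, 2, 2], some 2, some 1, false, false)

def Spec_find_all_subsets_advanced (nums : List Int) (max_size : Option Int) (min_size : Option Int) (distinct_only : Bool) (sort_subsets : Bool) (out : List (List Int)) : Prop := out = find_all_subsets_advanced_alt nums max_size min_size distinct_only sort_subsets
instance (nums : List Int) (max_size : Option Int) (min_size : Option Int) (distinct_only : Bool) (sort_subsets : Bool) (out : List (List Int)) : Decidable (Spec_find_all_subsets_advanced nums max_size min_size distinct_only sort_subsets out) := by unfold Spec_find_all_subsets_advanced; infer_instance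

-- ===== CLAIM (what is proved, stated in full; the proofs are below) =====
def Claim_equal_find_all_subsets_advanced : Prop := ∀ (nums : List Int) (max_size : Option Int) (min_size : Option Int) (distinct_only : Bool) (sort_subsets : Bool), Dom_find_all_subsets_advanced nums max_size min_size distinct_only sort_subsets → Pre_find_all_subsets_advanced nums max_size min_size distinct_only sort_subsets → Spec_find_all_subsets_advanced nums max_size min_size distinct_only sort_subsets (find_all_subsets_advanced nums max_size min_size distinct_only sort_subsets)

-- ===== LEMMAS AND PROOFS =====

-- proof-side view of the children of one (subset, rest) pair
def pvExpand (s : List Int) : List Int → List (List Int × List Int)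
  | [] => []
  | x :: t => (s ++ [x], t) :: pvExpand s t

-- proof-side level iteration
def pvIter : Nat → List (List Int × List Int) → List (List Int × List Int)
  | 0, l => l
  | k + 1, l => pvIter k (pvStep l)

theorem pvIter_succ_right (k : Nat) : ∀ (l : List (List Int × List Int)),
    pvIter (k + 1) l = pvStep (pvIter k l) := by
  induction k with
  | zero => intro l; rfl
  | succ k ih => intro l; exact ih (pvStep l)

theorem pvExpand_eq_aux (ys : List Int) : ∀ (ctx : List Int) (s : List Int),
    (PySem.List.enumerate ys ((ctx.length : Int))).map
      (fun q => (s ++ [q.2], PySem.List.slice (ctx ++ ys) (some (q.1 + 1)) none))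
    = pvExpand s ys := by
  induction ys with
  | nil => intro ctx s; simp [PySem.List.enumerate_nil, pvExpand]
  | cons x t ih =>
    intro ctx s
    have h1 : ((ctx.length : Int)) + 1 = (((ctx ++ [x]).length : Int)) := by simp
    have h2 : ctx ++ x :: t = (ctx ++ [x]) ++ t := by simp
    rw [PySem.List.enumerate_cons]
    simp only [List.map_cons, pvExpand, List.cons.injEq]
    refine ⟨?_, ?_⟩
    · rw [h1, PySem.List.slice_from_natCast, h2, List.drop_left]
    · rw [h1, h2]; exact ih (ctx ++ [x]) s

theorem pvStep_eq (level : List (List Int × List Int)) :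
    pvStep level = level.flatMap (fun p => pvExpand p.1 p.2) := by
  unfold pvStep
  apply List.flatMap_congr
  intro p _
  have := pvExpand_eq_aux p.2 [] p.1
  simpa using this

-- first-choice unrolling of pvCombinations
theorem pvExpand_combs (ys : List Int) : ∀ (r : Nat) (s : List Int),
    (pvExpand s ys).flatMap (fun p => (pvCombinations p.2 r).map (fun c => p.1 ++ c))
    = (pvCombinations ys (r + 1)).map (fun c => s ++ c) := by
  induction ys with
  | nil => intro r s; simp [pvExpand, pvCombinations]
  | cons x t ih =>
    intro r s
    simp only [pvExpand, List.flatMap_cons, pvCombinations, List.map_append, List.map_map]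
    rw [ih r s]
    congr 1
    apply List.map_congr_left
    intro c _
    simp

theorem pvCombinations_length (xs : List Int) : ∀ (r : Nat), ∀ c ∈ pvCombinations xs r, c.length = r := by
  induction xs with
  | nil =>
    intro r c hc
    cases r with
    | zero => simp [pvCombinations] at hc; simp [hc]
    | succ r => simp [pvCombinations] at hc
  | cons x t ih =>
    intro r c hc
    cases r with
    | zero => simp [pvCombinations] at hc; simp [hc]
    | succ r =>
      simp only [pvCombinations, List.mem_append, List.mem_map] at hc
      rcases hc with ⟨d, hd, rfl⟩ | hc
      · simp [ih r d hd]
      · exact ih (r+1) c hc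

theorem pvIter_map_fst (k : Nat) : ∀ (level : List (List Int × List Int)),
    (pvIter k level).map (fun p => p.1)
    = level.flatMap (fun p => (pvCombinations p.2 k).map (fun c => p.1 ++ c)) := by
  induction k with
  | zero =>
    intro level
    simp only [pvIter, pvCombinations, List.map_cons, List.map_nil, List.append_nil]
    exact List.map_eq_flatMap.symm ▸ (List.map_eq_flatMap (f := fun p : List Int × List Int => p.1) (l := level))
  | succ k ih =>
    intro level
    show (pvIter k (pvStep level)).map _ = _
    rw [ih (pvStep level), pvStep_eq, List.flatMap_assoc]
    apply List.flatMap_congr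
    intro p _
    exact pvExpand_combs p.2 k p.1

theorem pvSeed (xs : List Int) (k : Nat) :
    (pvIter k [([], xs)]).map (fun p => p.1) = pvCombinations xs k := by
  rw [pvIter_map_fst]
  simp

theorem pvFoldRange (lo : Int) (H : Nat) (acc : List (List Int)) (level : List (List Int × List Int)) :
    (List.range H).foldl
      (fun (st : List (List Int) × List (List Int × List Int)) (k : Nat) =>
        ((if lo ≤ (k : Int) then st.1 ++ st.2.map (fun p => p.1) else st.1), pvStep st.2))
      (acc, level)
    = (acc ++ (List.range H).flatMap
        (fun (k : Nat) => if lo ≤ (k : Int) then (pvIter k level).map (fun p => p.1) else []),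
       pvIter H level) := by
  induction H with
  | zero => simp [pvIter]
  | succ H ih =>
    rw [List.range_succ, List.foldl_append, ih, List.flatMap_append]
    simp only [List.foldl_cons, List.foldl_nil, List.flatMap_cons, List.flatMap_nil, List.append_nil]
    rw [pvIter_succ_right]
    split_ifs with h
    · simp [List.append_assoc]
    · simp

theorem pvLoopB_eq (xs : List Int) (lo hi : Int) :
    pvLoopB xs lo hi
    = (List.range (hi + 1).toNat).flatMap
        (fun (k : Nat) => if lo ≤ (k : Int) then pvCombinations xs k else []) := by
  unfold pvLoopB
  rw [PySem.List.pyRange_one, List.foldl_map]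
  simp only [sub_zero, zero_add]
  rw [pvFoldRange]
  simp only [List.nil_append]
  apply List.flatMap_congr
  intro k _
  rw [pvSeed]

theorem combs_filter_min (xs : List Int) (r : Nat) (m : Int) :
    (pvCombinations xs r).filter (fun s => decide (m ≤ (s.length : Int)))
    = if m ≤ (r : Int) then pvCombinations xs r else [] := by
  split_ifs with h
  · apply List.filter_eq_self.mpr
    intro c hc
    simp [pvCombinations_length xs r c hc, h]
  · apply List.filter_eq_nil_iff.mpr
    intro c hc
    simp [pvCombinations_length xs r c hc, h]

theorem combs_filter_max (xs : List Int) (r : Nat) (m : Int) :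
    (pvCombinations xs r).filter (fun s => decide ((s.length : Int) ≤ m))
    = if (r : Int) ≤ m then pvCombinations xs r else [] := by
  split_ifs with h
  · apply List.filter_eq_self.mpr
    intro c hc
    simp [pvCombinations_length xs r c hc, h]
  · apply List.filter_eq_nil_iff.mpr
    intro c hc
    simp [pvCombinations_length xs r c hc, h]

theorem pvFilteredA_eq (xs : List Int) (max_size min_size : Option Int) (lo hi : Int)
    (hlo : lo = match min_size with | none => 0 | some m => max 0 m)
    (hhi : hi = match max_size with | none => (xs.length : Int) | some m => min (xs.length : Int) m) :
    pvFilteredA xs max_size min_size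
    = (List.range (xs.length + 1)).flatMap
        (fun (r : Nat) => if lo ≤ (r : Int) ∧ (r : Int) ≤ hi then pvCombinations xs r else []) := by
  cases min_size with
  | none =>
    cases max_size with
    | none =>
      simp only at hlo hhi
      subst hlo hhi
      unfold pvFilteredA
      apply List.flatMap_congr
      intro r hr
      rw [List.mem_range] at hr
      rw [if_pos ⟨by positivity, by exact_mod_cast Nat.lt_succ_iff.mp hr⟩]
    | some M =>
      simp only at hlo hhi
      subst hlo hhi
      unfold pvFilteredA
      simp only [List.filter_flatMap]
      apply List.flatMap_congr
      intro r hr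
      rw [List.mem_range] at hr
      rw [combs_filter_max]
      have hrn : (r : Int) ≤ (xs.length : Int) := by exact_mod_cast Nat.lt_succ_iff.mp hr
      by_cases h : (r : Int) ≤ M
      · rw [if_pos h, if_pos ⟨by positivity, le_min hrn h⟩]
      · rw [if_neg h, if_neg (by simp only [le_min_iff]; tauto)]
  | some m =>
    cases max_size with
    | none =>
      simp only at hlo hhi
      subst hlo hhi
      unfold pvFilteredA
      simp only [List.filter_flatMap]
      apply List.flatMap_congr
      intro r hr
      rw [List.mem_range] at hr
      rw [combs_filter_min]
      have hrn : (r : Int) ≤ (xs.length : Int) := by exact_mod_cast Nat.lt_succ_iff.mp hr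
      by_cases h : m ≤ (r : Int)
      · rw [if_pos h, if_pos ⟨max_le (by positivity) h, hrn⟩]
      · rw [if_neg h, if_neg (by simp only [max_le_iff]; tauto)]
    | some M =>
      simp only at hlo hhi
      subst hlo hhi
      unfold pvFilteredA
      simp only [List.filter_flatMap]
      apply List.flatMap_congr
      intro r hr
      rw [List.mem_range] at hr
      rw [combs_filter_min]
      have hrn : (r : Int) ≤ (xs.length : Int) := by exact_mod_cast Nat.lt_succ_iff.mp hr
      by_cases h1 : m ≤ (r : Int)
      · rw [if_pos h1, combs_filter_max]
        by_cases h2 : (r : Int) ≤ M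
        · rw [if_pos h2, if_pos ⟨max_le (by positivity) h1, le_min hrn h2⟩]
        · rw [if_neg h2, if_neg (by simp only [max_le_iff, le_min_iff]; tauto)]
      · rw [if_neg h1, List.filter_nil, if_neg (by simp only [max_le_iff, le_min_iff]; tauto)]

theorem pvRanges_eq (xs : List Int) (lo hi : Int) (hn : hi ≤ (xs.length : Int)) :
    (List.range (xs.length + 1)).flatMap
      (fun (r : Nat) => if lo ≤ (r : Int) ∧ (r : Int) ≤ hi then pvCombinations xs r else [])
    = (List.range (hi + 1).toNat).flatMap
        (fun (k : Nat) => if lo ≤ (k : Int) then pvCombinations xs k else []) := by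
  rcases Int.lt_or_le hi 0 with hneg | hpos
  · have hz : (hi + 1).toNat = 0 := by omega
    rw [hz]
    simp only [List.range_zero, List.flatMap_nil]
    rw [List.flatMap_congr (g := fun _ => ([] : List (List Int)))
      (fun r _ => if_neg (by intro ⟨_, h2⟩; omega))]
    simp
  · have hH : (hi + 1).toNat ≤ xs.length + 1 := by omega
    have hsplit : xs.length + 1 = (hi + 1).toNat + (xs.length + 1 - (hi + 1).toNat) := by omega
    rw [hsplit, List.range_add, List.flatMap_append]
    have htail : (List.map (fun x => (hi + 1).toNat + x) (List.range (xs.length + 1 - (hi + 1).toNat))).flatMap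
        (fun (r : Nat) => if lo ≤ (r : Int) ∧ (r : Int) ≤ hi then pvCombinations xs r else []) = [] := by
      rw [List.flatMap_congr (g := fun _ => ([] : List (List Int)))]
      · simp
      · intro r hr
        simp only [List.mem_map, List.mem_range] at hr
        obtain ⟨j, _, rfl⟩ := hr
        apply if_neg
        intro ⟨_, h2⟩
        have : ((hi + 1).toNat : Int) = hi + 1 := by omega
        push_cast at h2
        omega
    rw [htail, List.append_nil]
    apply List.flatMap_congr
    intro k hk
    rw [List.mem_range] at hk
    have hk2 : (k : Int) ≤ hi := by omega
    by_cases h : lo ≤ (k : Int)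
    · rw [if_pos ⟨h, hk2⟩, if_pos h]
    · rw [if_neg (by tauto), if_neg h]

theorem pre_sort_eq (xs : List Int) (max_size min_size : Option Int) (lo hi : Int)
    (hlo : lo = match min_size with | none => 0 | some m => max 0 m)
    (hhi : hi = match max_size with | none => (xs.length : Int) | some m => min (xs.length : Int) m) :
    pvFilteredA xs max_size min_size = pvLoopB xs lo hi := by
  have hn : hi ≤ (xs.length : Int) := by
    cases max_size with
    | none => simp only at hhi; omega
    | some M => simp only at hhi; subst hhi; exact min_le_left _ _
  rw [pvFilteredA_eq xs max_size min_size lo hi hlo hhi, pvRanges_eq xs lo hi hn, pvLoopB_eq]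

theorem pvComb_perm_sublistsLen (xs : List Int) : ∀ r : Nat, (pvCombinations xs r).Perm (List.sublistsLen r xs) := by
  induction xs with
  | nil => intro r; cases r <;> simp [pvCombinations]
  | cons x t ih =>
    intro r
    cases r with
    | zero => simp [pvCombinations]
    | succ r =>
      rw [List.sublistsLen_succ_cons]
      exact ((((ih r).map _).append (ih (r + 1))).trans List.perm_append_comm)

theorem pvSortCons (x : Int) (c : List Int) :
    PySem.List.sorted (x :: c) (fun y => y) false
    = PySem.List.sorted (x :: PySem.List.sorted c (fun y => y) false) (fun y => y) false :=
  PySem.List.sorted_eq_sorted_of_perm _ _ _ (fun _ _ h => h)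
    (((PySem.List.sorted_perm c (fun y => y) false).symm).cons x)

theorem pvSortSwap (x y : Int) (c : List Int) :
    PySem.List.sorted (y :: x :: c) (fun z => z) false
    = PySem.List.sorted (x :: y :: c) (fun z => z) false :=
  PySem.List.sorted_eq_sorted_of_perm _ _ _ (fun _ _ h => h) (List.Perm.swap x y c)

theorem pvFlatMap_perm {α β : Type} (l : List α) (f g : α → List β)
    (hp : ∀ a ∈ l, (f a).Perm (g a)) : (l.flatMap f).Perm (l.flatMap g) := by
  induction l with
  | nil => exact List.Perm.refl _
  | cons a l ih =>
    simp only [List.flatMap_cons]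
    exact (hp a (by simp)).append (ih (fun b hb => hp b (by simp [hb])))

theorem pvMapConsSorted (x : Int) (L1 L2 : List (List Int))
    (h : (L1.map (fun c => PySem.List.sorted c (fun y => y) false)).Perm
      (L2.map (fun c => PySem.List.sorted c (fun y => y) false))) :
    ((L1.map (List.cons x)).map (fun c => PySem.List.sorted c (fun y => y) false)).Perm
      ((L2.map (List.cons x)).map (fun c => PySem.List.sorted c (fun y => y) false)) := by
  have e : ∀ L : List (List Int),
      (L.map (List.cons x)).map (fun c => PySem.List.sorted c (fun y => y) false)
      = (L.map (fun c => PySem.List.sorted c (fun y => y) false)).map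
          (fun c => PySem.List.sorted (x :: c) (fun y => y) false) := by
    intro L
    simp only [List.map_map]
    exact List.map_congr_left (fun c _ => pvSortCons x c)
  rw [e L1, e L2]
  exact h.map _

theorem pvSub_perm (xs ys : List Int) (h : xs.Perm ys) : ∀ r : Nat,
    ((List.sublistsLen r xs).map (fun c => PySem.List.sorted c (fun y => y) false)).Perm
      ((List.sublistsLen r ys).map (fun c => PySem.List.sorted c (fun y => y) false)) := by
  induction h with
  | nil => intro r; exact List.Perm.refl _
  | @cons x l₁ l₂ h ih =>
    intro r
    cases r with
    | zero => simp
    | succ r =>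
      simp only [List.sublistsLen_succ_cons, List.map_append]
      exact (ih (r + 1)).append (pvMapConsSorted x _ _ (ih r))
  | @swap x y l =>
    intro r
    cases r with
    | zero => simp
    | succ r =>
      cases r with
      | zero =>
        simp only [List.sublistsLen_succ_cons, List.sublistsLen_zero, List.map_append,
          List.map_cons, List.map_nil, List.append_assoc]
        exact List.Perm.append_left _ (List.perm_append_comm)
      | succ r =>
        simp only [List.sublistsLen_succ_cons, List.map_append, List.append_assoc]
        have hD : (((List.sublistsLen r l).map (List.cons x)).map (List.cons y)).map
              (fun c => PySem.List.sorted c (fun z => z) false)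
            = (((List.sublistsLen r l).map (List.cons y)).map (List.cons x)).map
              (fun c => PySem.List.sorted c (fun z => z) false) := by
          simp only [List.map_map]
          exact List.map_congr_left (fun c _ => pvSortSwap x y c)
        rw [hD]
        exact List.Perm.append_left _ (List.perm_append_comm_assoc _ _ _)
  | trans h₁ h₂ ih₁ ih₂ => intro r; exact (ih₁ r).trans (ih₂ r)

theorem pvCombs_map_sorted_perm (xs ys : List Int) (h : xs.Perm ys) (r : Nat) :
    ((pvCombinations xs r).map (fun c => PySem.List.sorted c (fun y => y) false)).Perm
      ((pvCombinations ys r).map (fun c => PySem.List.sorted c (fun y => y) false)) :=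
  (((pvComb_perm_sublistsLen xs r).map _).trans (pvSub_perm xs ys h r)).trans
    (((pvComb_perm_sublistsLen ys r).map _).symm)

theorem pvSortedLL_eq_of_perm (L1 L2 : List (List Int)) (h : L1.Perm L2) :
    PySem.List.sorted L1 (fun x => x) false = PySem.List.sorted L2 (fun x => x) false := by
  have := PySem.List.sorted_eq_sorted_of_perm L1 L2 (fun x => x) (fun _ _ hh => hh) h
  convert this using 2

theorem pvFiltered_perm (xs ys : List Int) (mx mn : Option Int) (h : xs.Perm ys) :
    ((pvFilteredA xs mx mn).map (fun c => PySem.List.sorted c (fun y => y) false)).Perm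
      ((pvFilteredA ys mx mn).map (fun c => PySem.List.sorted c (fun y => y) false)) := by
  have hlen : ys.length = xs.length := h.length_eq.symm
  rw [pvFilteredA_eq xs mx mn
      (match mn with | none => 0 | some m => max 0 m)
      (match mx with | none => (xs.length : Int) | some m => min (xs.length : Int) m) rfl rfl,
    pvFilteredA_eq ys mx mn
      (match mn with | none => 0 | some m => max 0 m)
      (match mx with | none => (xs.length : Int) | some m => min (xs.length : Int) m) rfl
      (by cases mx <;> simp [hlen]),
    hlen, List.map_flatMap, List.map_flatMap]
  apply pvFlatMap_perm
  intro r _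
  by_cases hc : (match mn with | none => 0 | some m => max 0 m) ≤ (r : Int) ∧
      (r : Int) ≤ (match mx with | none => (xs.length : Int) | some m => min (xs.length : Int) m)
  · rw [if_pos hc, if_pos hc]
    exact pvCombs_map_sorted_perm xs ys h r
  · rw [if_neg hc, if_neg hc]

-- ===== VERDICT (by name: the statement is the Claim_ definition above) =====
theorem find_all_subsets_advanced_spec : Claim_equal_find_all_subsets_advanced := by
  intro nums max_size min_size distinct_only sort_subsets _ hpre
  unfold Spec_find_all_subsets_advanced
  unfold find_all_subsets_advanced find_all_subsets_advanced_alt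
  cases distinct_only with
  | false =>
    simp only [Bool.false_eq_true, if_false]
    rw [pre_sort_eq nums max_size min_size _ _ rfl rfl]
  | true =>
    have hs : sort_subsets = true := hpre rfl
    subst hs
    simp only [if_true]
    rw [← pre_sort_eq (PySem.List.sorted (PySem.Set.ofList nums) (fun x => x) false)
      max_size min_size _ _ rfl rfl]
    exact pvSortedLL_eq_of_perm _ _
      (pvFiltered_perm (PySem.Set.ofList nums)
        (PySem.List.sorted (PySem.Set.ofList nums) (fun x => x) false) max_size min_size
        ((PySem.List.sorted_perm (PySem.Set.ofList nums) (fun x => x) false).symm))
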